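-- pv_equiv track=rewrite | github.com/DravinRai/election-assistant | services/vertex_service.py | _check_blocked_patterns
-- ===== SOURCE A (Python) =====
-- _BLOCKED_PATTERNS: set[str] = {
--     "hack",
--     "exploit",
--     "steal election",
--     "voter fraud scheme",
--     "suppress votes",
--     "fake ballots",
--     "rig election",
-- }
--
-- def _check_blocked_patterns(text: str) -> str | None:
--     """Check text against known blocked patterns.
--
--     Detailed description:
--         Provides basic string matching to reject known negative phrases.
--
--     Args:
--         text: The user's input text.
--
--     Returns:
--         Rejection reason if blocked, else None.
--
--     Raises:
--         None
--
--     Example: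
--         >>> reason = VertexService._check_blocked_patterns("rig election")
--     """
--     lower: str = text.lower()
--     for pattern in _BLOCKED_PATTERNS:
--         if pattern in lower:
--             return (
--                 "Your message appears to contain content that could "
--                 "undermine election integrity. I can only provide "
--                 "educational information about election processes."
--             )
--     return None
-- ===== SOURCE B (Python) =====
-- _BLOCKED_PATTERNS: set[str] = {
--     "hack",
--     "exploit",
--     "steal election",
--     "voter fraud scheme",
--     "suppress votes",
--     "fake ballots",
--     "rig election",
-- }
--
-- _REJECTION = (
--     "Your message appears to contain content that could "
--     "undermine election integrity. I can only provide "
--     "educational information about election processes."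
-- )
--
--
-- def _check_blocked_patterns(text: str) -> str | None:
--     """Single left-to-right scan: at each position, test whether any
--     blocked phrase starts there (position-major instead of pattern-major)."""
--     lower = text.lower()
--     pats = tuple(_BLOCKED_PATTERNS)
--     for i in range(len(lower) + 1):
--         if any(lower.startswith(p, i) for p in pats):
--             return _REJECTION
--     return None
-- ===== Notes on version B (the rewrite author's own statement) =====
-- stated objective: alternative
-- what changed: Replaces A's pattern-major loop of seven independent substring scans by a single position-major left-to-right scan that at each index tests whether any blocked phrase starts there (the hand-rolled equivalent of one alternation-regex pass).
import Mathlib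
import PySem

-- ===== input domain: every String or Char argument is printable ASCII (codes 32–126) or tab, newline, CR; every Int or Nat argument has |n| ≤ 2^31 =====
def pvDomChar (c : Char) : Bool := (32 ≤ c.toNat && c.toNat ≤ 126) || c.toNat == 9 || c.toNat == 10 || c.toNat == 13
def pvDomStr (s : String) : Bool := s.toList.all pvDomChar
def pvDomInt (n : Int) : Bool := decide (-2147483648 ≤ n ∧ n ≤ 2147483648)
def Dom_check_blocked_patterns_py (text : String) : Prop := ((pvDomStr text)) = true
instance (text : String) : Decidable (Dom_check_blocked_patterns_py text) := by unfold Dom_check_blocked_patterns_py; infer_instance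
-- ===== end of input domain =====

-- B replaces A's pattern-major loop of seven substring scans with one position-major
-- left-to-right scan (alternative decomposition, same cost class; return value only).


-- ===== PORT A =====
-- the module-level set _BLOCKED_PATTERNS (insertion order)
def pvBlocked : List String :=
  ["hack", "exploit", "steal election", "voter fraud scheme",
   "suppress votes", "fake ballots", "rig election"]

def pvRejection : String :=
  "Your message appears to contain content that could undermine election integrity. I can only provide educational information about election processes."

-- the 'for pattern in _BLOCKED_PATTERNS: if pattern in lower: return …' loop
def pvLoopA (lower : String) : List String → Option String
  | [] => none
  | p :: rest => if PySem.Str.isIn p lower then some pvRejection else pvLoopA lower rest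

def check_blocked_patterns_py (text : String) : Option String :=
  let lower : String := PySem.Str.lower text
  pvLoopA lower pvBlocked

-- ===== PORT B =====
-- position-major scan: does any pattern start at position 0 of cs, else recurse on the tail
def pvScanB (pats : List (List Char)) : List Char → Bool
  | [] => pats.any (fun p => List.isPrefixOf p [])
  | c :: rest => pats.any (fun p => List.isPrefixOf p (c :: rest)) || pvScanB pats rest

def check_blocked_patterns_py_alt (text : String) : Option String :=
  let lower : String := PySem.Str.lower text
  if pvScanB (pvBlocked.map String.toList) lower.toList then some pvRejection else none

-- ===== PRECONDITION & SPEC =====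
def Spec_check_blocked_patterns_py (text : String) (out : Option String) : Prop := out = check_blocked_patterns_py_alt text
instance (text : String) (out : Option String) : Decidable (Spec_check_blocked_patterns_py text out) := by unfold Spec_check_blocked_patterns_py; infer_instance

-- ===== CLAIM (what is proved, stated in full; the proofs are below) =====
def Claim_equal_check_blocked_patterns_py : Prop := ∀ (text : String), Dom_check_blocked_patterns_py text → Spec_check_blocked_patterns_py text (check_blocked_patterns_py text)

-- ===== LEMMAS AND PROOFS =====

-- A's loop is 'if any pattern occurs then the rejection else none'
theorem pvLoopA_eq (lower : String) (pats : List String) :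
    pvLoopA lower pats =
      if pats.any (fun p => PySem.Str.isIn p lower) then some pvRejection else none := by
  induction pats with
  | nil => rfl
  | cons p rest ih =>
    rw [pvLoopA, ih, List.any_cons]
    cases h : PySem.Str.isIn p lower
    · rw [if_neg (by simp)]; rw [Bool.false_or]
    · simp only [Bool.true_or]; rfl

-- B's scan is true iff some pattern is a prefix of some suffix
theorem pvScanB_iff (pats : List (List Char)) (cs : List Char) :
    pvScanB pats cs = true ↔ ∃ p ∈ pats, ∃ j, p <+: cs.drop j := by
  induction cs with
  | nil =>
    simp only [pvScanB, List.any_eq_true]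
    constructor
    · rintro ⟨p, hp, hpre⟩
      exact ⟨p, hp, 0, by simpa using List.isPrefixOf_iff_prefix.mp hpre⟩
    · rintro ⟨p, hp, j, hpre⟩
      exact ⟨p, hp, List.isPrefixOf_iff_prefix.mpr (by simpa using hpre)⟩
  | cons c rest ih =>
    simp only [pvScanB, Bool.or_eq_true, List.any_eq_true, ih]
    constructor
    · rintro (⟨p, hp, hpre⟩ | ⟨p, hp, j, hpre⟩)
      · exact ⟨p, hp, 0, by simpa using List.isPrefixOf_iff_prefix.mp hpre⟩
      · exact ⟨p, hp, j + 1, by simpa using hpre⟩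
    · rintro ⟨p, hp, j, hpre⟩
      cases j with
      | zero => exact Or.inl ⟨p, hp, List.isPrefixOf_iff_prefix.mpr (by simpa using hpre)⟩
      | succ j => exact Or.inr ⟨p, hp, j, by simpa using hpre⟩

-- hence B's scan coincides with 'some pattern is a substring'
theorem pvScanB_eq_any (pats : List String) (lower : String) :
    pvScanB (pats.map String.toList) lower.toList =
      pats.any (fun p => PySem.Str.isIn p lower) := by
  rcases h : pats.any (fun p => PySem.Str.isIn p lower) with _ | _
  · rw [Bool.eq_false_iff]
    intro hscan
    rcases (pvScanB_iff _ _).mp hscan with ⟨pl, hpl, j, hpre⟩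
    rcases List.mem_map.mp hpl with ⟨p, hp, rfl⟩
    have : PySem.Str.isIn p lower = true := by
      rw [PySem.Str.isIn_iff_infix]
      exact (PySem.Chars.isIn_iff_infix _ _).mp
        ((PySem.Chars.exists_prefix_drop_iff_isIn _ _).mp ⟨j, hpre⟩)
    exact absurd this (by simpa using (List.any_eq_false.mp h p hp))
  · rcases List.any_eq_true.mp h with ⟨p, hp, hin⟩
    apply (pvScanB_iff _ _).mpr
    have := (PySem.Chars.isIn_iff_infix _ _).mpr ((PySem.Str.isIn_iff_infix _ _).mp hin)
    rcases (PySem.Chars.exists_prefix_drop_iff_isIn _ _).mpr this with ⟨j, hpre⟩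
    exact ⟨p.toList, List.mem_map_of_mem hp, j, hpre⟩

-- ===== VERDICT (by name: the statement is the Claim_ definition above) =====
theorem check_blocked_patterns_py_spec : Claim_equal_check_blocked_patterns_py := by
  intro text _
  unfold Spec_check_blocked_patterns_py check_blocked_patterns_py check_blocked_patterns_py_alt
  simp only []
  rw [pvLoopA_eq, pvScanB_eq_any]
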